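-- pv_equiv track=rewrite | github.com/MasterAI-EAM/MatEmbedding | utils.py | find_token
-- ===== SOURCE A (Python) =====
-- def find_token(mat, tok_sen):
--     candidate = []
--     for i, t in enumerate(tok_sen):
--         if mat.startswith(t):
--             idx = [i]
--             can = t
--             tmp = i
--             if can == mat:
--                 candidate.extend(idx)
--             if i == len(tok_sen) - 1:
--                 break
--             while True:
--                 can += tok_sen[tmp + 1].replace('##', '')
--                 if not mat.startswith(can):
--                     break
--                 idx.append(tmp + 1)
--                 if can == mat:
--                     candidate.extend(idx)
--                     break
--                 if tmp == len(tok_sen) - 2: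
--                     break
--                 else:
--                     tmp += 1
--     return candidate
-- ===== SOURCE B (Python) =====
-- def find_token(mat, tok_sen):
--     # Two staged passes: first build a backward DP table fin, where
--     # fin[j][p] = the token index e at which the stripped pieces j, j+1, ...
--     # greedily matched against mat starting at character offset p reach
--     # exactly the end of mat (or -1 if they mismatch / run out first);
--     # then a single lookup loop over starting tokens reads the answer off
--     # the table instead of re-scanning forward per start.
--     m = len(mat)
--     n = len(tok_sen)
--     pieces = [t.replace('##', '') for t in tok_sen]
--     fin = [[-1] * (m + 1) for _ in range(n + 1)]
--     for j in range(n - 1, -1, -1):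
--         pc = pieces[j]
--         L = len(pc)
--         for p in range(m + 1):
--             if mat[p:p + L] == pc:
--                 fin[j][p] = j if p + L == m else fin[j + 1][p + L]
--     out = []
--     for i, t in enumerate(tok_sen):
--         if not mat.startswith(t):
--             continue
--         if len(t) == m:
--             out.append(i)
--         e = fin[i + 1][len(t)]
--         if e != -1:
--             out.extend(range(i, e + 1))
--     return out
-- ===== Notes on version B (the rewrite author's own statement) =====
-- stated objective: alternative
-- what changed: B precomputes a backward dynamic-programming table fin[j][p] (the token index where the stripped pieces from j on, matched at character offset p, complete mat, or -1), then a single lookup loop reads each start's answer off the table, instead of A's per-start forward rescan of a growing concatenation with startswith.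
import Mathlib
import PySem

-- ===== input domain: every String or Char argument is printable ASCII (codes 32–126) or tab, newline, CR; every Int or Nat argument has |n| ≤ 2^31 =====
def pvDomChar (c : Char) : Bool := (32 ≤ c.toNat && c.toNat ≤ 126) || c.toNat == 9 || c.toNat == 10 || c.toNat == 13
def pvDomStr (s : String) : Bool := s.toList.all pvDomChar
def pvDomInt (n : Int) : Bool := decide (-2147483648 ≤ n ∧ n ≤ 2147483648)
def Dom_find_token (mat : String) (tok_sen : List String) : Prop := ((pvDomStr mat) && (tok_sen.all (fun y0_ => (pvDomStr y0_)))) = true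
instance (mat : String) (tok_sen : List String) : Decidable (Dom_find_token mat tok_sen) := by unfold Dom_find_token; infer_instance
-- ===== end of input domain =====

-- B replaces A's per-start forward rescan of a growing concatenation by a
-- staged backward DP table read off by a single lookup loop (alternative).

-- ===== PORT A =====
-- the inner `while True` loop: `rest` is tok_sen[tmp+1:], so Python's guard
-- `tmp == len(tok_sen) - 2` is exactly `rest' = []` here (tmp+1 is the last index)
def pvAWhile (m can : List Char) (idx : List Int) (tmp : Nat) : List (List Char) → List Int
  | [] => []   -- unreachable from find_token: the while is only entered with tokens remaining
  | piece :: rest =>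
    let can' := can ++ PySem.Chars.replace piece ['#','#'] []
    if PySem.Chars.startswith m can' = false then []
    else
      let idx' := idx ++ [((tmp : Int) + 1)]
      if can' = m then idx'
      else if rest.isEmpty then []                   -- tmp == len(tok_sen) - 2 → break
      else pvAWhile m can' idx' (tmp + 1) rest

-- the outer `for i, t in enumerate(tok_sen)` loop; `rest = []` is `i == len(tok_sen) - 1`
def pvAOuter (m : List Char) : Nat → List (List Char) → List Int
  | _, [] => []
  | i, t :: rest =>
    if PySem.Chars.startswith m t then
      (if t = m then [(i : Int)] else []) ++
      (if rest.isEmpty then []                      -- i == len(tok_sen) - 1 → break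
       else pvAWhile m t [(i : Int)] i rest ++ pvAOuter m (i + 1) rest)
    else pvAOuter m (i + 1) rest

def find_token (mat : String) (tok_sen : List String) : List Int :=
  pvAOuter mat.toList 0 (tok_sen.map String.toList)

-- ===== PORT B =====
-- pieces[j] = tok_sen[j].replace('##', '')
def pvStrip (t : List Char) : List Char := PySem.Chars.replace t ['#','#'] []

-- one row of Source B's table: fin[j][p] for p in range(m+1)
-- (Python indexes fin[j+1][p+L] directly; the index is provably in range
--  whenever the slice matches, so `getD … (-1)` is exact there)
def pvRow (m : List Char) (j : Nat) (pc : List Char) (next : List Int) : List Int :=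
  (List.range (m.length + 1)).map fun (p : Nat) =>
    if PySem.List.slice m (some (p : Int)) (some ((p : Int) + (pc.length : Int))) = pc then
      (if p + pc.length = m.length then (j : Int) else next.getD (p + pc.length : Nat) (-1))
    else -1

-- Source B's `for j in range(n-1, -1, -1)` filling pass, built back-to-front:
-- row n is all -1, row j is computed from row j+1
def pvFin (m : List Char) : Nat → List (List Char) → List (List Int)
  | _, [] => [List.replicate (m.length + 1) (-1)]
  | j, pc :: rest =>
    let tail := pvFin m (j + 1) rest
    pvRow m j pc (tail.headD []) :: tail

-- Source B's final lookup loop over `enumerate(tok_sen)`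
def pvBLook (m : List Char) (rows : List (List Int)) : Nat → List (List Char) → List Int
  | _, [] => []
  | i, t :: rest =>
    (if PySem.Chars.startswith m t then
       (if t.length = m.length then [(i : Int)] else []) ++
       (let e := (rows.getD (i + 1) []).getD t.length (-1)
        if e ≠ -1 then PySem.List.pyRange (i : Int) (e + 1) 1 else [])
     else []) ++ pvBLook m rows (i + 1) rest

def find_token_alt (mat : String) (tok_sen : List String) : List Int :=
  let pieces := (tok_sen.map String.toList).map pvStrip
  pvBLook mat.toList (pvFin mat.toList 0 pieces) 0 (tok_sen.map String.toList)

-- ===== PRECONDITION & SPEC =====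
def Spec_find_token (mat : String) (tok_sen : List String) (out : List Int) : Prop := out = find_token_alt mat tok_sen
instance (mat : String) (tok_sen : List String) (out : List Int) : Decidable (Spec_find_token mat tok_sen out) := by unfold Spec_find_token; infer_instance

-- ===== CLAIM (what is proved, stated in full; the proofs are below) =====
def Claim_equal_find_token : Prop := ∀ (mat : String) (tok_sen : List String), Dom_find_token mat tok_sen → Spec_find_token mat tok_sen (find_token mat tok_sen)

-- ===== LEMMAS AND PROOFS =====

-- the greedy chain that one table lookup fin[j][p] denotes (proof-only spec)
def pvChain (m : List Char) : Nat → Nat → List (List Char) → Int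
  | _, _, [] => -1
  | p, j, pc :: rest =>
    if (m.drop p).take pc.length = pc then
      (if p + pc.length = m.length then (j : Int) else pvChain m (p + pc.length) (j + 1) rest)
    else -1

lemma pv_take_eq_iff_prefix {α : Type} [DecidableEq α] (l p : List α) :
    l.take p.length = p ↔ p <+: l := by
  constructor
  · intro h
    have hlen : p.length ≤ l.length := by
      by_contra hlt
      have := congrArg List.length h
      simp at this
      omega
    exact h ▸ List.take_prefix _ _
  · intro h
    obtain ⟨s, rfl⟩ := h
    simp

lemma pv_match_le (m pc : List Char) (p : Nat) (hp : p ≤ m.length)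
    (h : (m.drop p).take pc.length = pc) : p + pc.length ≤ m.length := by
  have := congrArg List.length h
  simp at this
  omega

lemma pv_fin_head (m : List Char) :
    ∀ (pieces : List (List Char)) (j p : Nat), p ≤ m.length →
      ((pvFin m j pieces).headD []).getD p (-1) = pvChain m p j pieces := by
  intro pieces
  induction pieces with
  | nil =>
    intro j p hp
    simp only [pvFin, pvChain, List.headD]
    rw [List.getD_eq_getElem _ _ (by simp; omega)]
    simp
  | cons pc rest ih =>
    intro j p hp
    simp only [pvFin, List.headD, pvChain]
    unfold pvRow
    rw [List.getD_eq_getElem _ _ (by simp; omega)]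
    rw [List.getElem_map, List.getElem_range]
    rw [PySem.List.slice_natCast_add]
    by_cases hmatch : (m.drop p).take pc.length = pc
    · rw [if_pos hmatch, if_pos hmatch]
      by_cases hfull : p + pc.length = m.length
      · rw [if_pos hfull, if_pos hfull]
      · rw [if_neg hfull, if_neg hfull]
        exact ih (j + 1) (p + pc.length) (pv_match_le m pc p hp hmatch)
    · rw [if_neg hmatch, if_neg hmatch]

lemma pv_fin_drop (m : List Char) :
    ∀ (pieces : List (List Char)) (j k : Nat), k ≤ pieces.length →
      (pvFin m j pieces).getD k [] = (pvFin m (j + k) (pieces.drop k)).headD [] := by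
  intro pieces
  induction pieces with
  | nil =>
    intro j k hk
    simp only [List.length_nil, Nat.le_zero] at hk
    subst hk
    simp [pvFin]
  | cons pc rest ih =>
    intro j k hk
    cases k with
    | zero => simp [pvFin]
    | succ k' =>
      have : (pvFin m j (pc :: rest)).getD (k' + 1) [] = (pvFin m (j + 1) rest).getD k' [] := by
        simp [pvFin]
      rw [this, ih (j + 1) k' (by simp only [List.length_cons] at hk; omega),
          show j + 1 + k' = j + (k' + 1) from by omega]
      simp

lemma pv_fin_lookup (m : List Char) (pieces : List (List Char)) (k p : Nat)
    (hk : k ≤ pieces.length) (hp : p ≤ m.length) :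
    ((pvFin m 0 pieces).getD k []).getD p (-1) = pvChain m p k (pieces.drop k) := by
  rw [pv_fin_drop m pieces 0 k hk, pv_fin_head m (pieces.drop k) (0 + k) p hp]
  norm_num

lemma pv_while_chain (m : List Char) (i : Nat) :
    ∀ (rest : List (List Char)) (tmp pos : Nat),
      pos ≤ m.length → (i : Int) ≤ (tmp : Int) + 1 →
      pvAWhile m (m.take pos) (PySem.List.pyRange (i : Int) ((tmp : Int) + 1) 1) tmp rest
        = (let e := pvChain m pos (tmp + 1) (rest.map pvStrip)
           if e = -1 then [] else PySem.List.pyRange (i : Int) (e + 1) 1) := by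
  intro rest
  induction rest with
  | nil => intro tmp pos _ _; simp [pvAWhile, pvChain]
  | cons tok rest ih =>
    intro tmp pos hpos hi
    simp only [pvAWhile, List.map_cons, pvChain, pvStrip]
    set piece := PySem.Chars.replace tok ['#','#'] [] with hp
    have hsplit : m = m.take pos ++ m.drop pos := (List.take_append_drop pos m).symm
    have hpre : PySem.Chars.startswith m (m.take pos ++ piece) = true ↔ piece <+: m.drop pos := by
      rw [PySem.Chars.startswith_iff]
      nth_rewrite 2 [hsplit]
      exact List.prefix_append_right_inj _
    by_cases hmatch : (m.drop pos).take piece.length = piece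
    · have hpfx : piece <+: m.drop pos := (pv_take_eq_iff_prefix _ _).mp hmatch
      have hsw : PySem.Chars.startswith m (m.take pos ++ piece) = true := hpre.mpr hpfx
      rw [if_neg (show ¬(PySem.Chars.startswith m (m.take pos ++ piece) = false) from by simp [hsw]),
          if_pos hmatch]
      have hcanpre : (m.take pos ++ piece) <+: m := by
        nth_rewrite 2 [hsplit]
        exact (List.prefix_append_right_inj _).mpr hpfx
      have hlen : (m.take pos ++ piece).length = pos + piece.length := by
        simp [Nat.min_eq_left hpos]
      have hle : pos + piece.length ≤ m.length := pv_match_le m piece pos hpos hmatch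
      have heqiff : m.take pos ++ piece = m ↔ pos + piece.length = m.length := by
        constructor
        · intro h; rw [← h, hlen]
        · intro h; exact hcanpre.eq_of_length (by omega)
      have hcast : (((tmp + 1 : Nat) : Int) + 1) = ((tmp : Int) + 1) + 1 := by push_cast; ring
      by_cases hfull : pos + piece.length = m.length
      · rw [if_pos (heqiff.mpr hfull), if_pos hfull]
        rw [if_neg (show ¬(((tmp + 1 : Nat) : Int) = -1) from by push_cast; omega)]
        rw [hcast, PySem.List.pyRange_one_succ_right hi]
      · rw [if_neg (fun h => hfull (heqiff.mp h)), if_neg hfull]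
        have hcan' : m.take pos ++ piece = m.take (pos + piece.length) := by
          rw [List.prefix_iff_eq_take.mp hcanpre, hlen]
        cases rest with
        | nil => simp [pvChain]
        | cons r rs =>
          rw [show (r :: rs).isEmpty = false from rfl, if_neg (by simp), hcan',
              show (PySem.List.pyRange (i : Int) ((tmp : Int) + 1) 1 ++ [(tmp : Int) + 1])
                = PySem.List.pyRange (i : Int) (((tmp + 1 : Nat) : Int) + 1) 1 from by
                rw [hcast, PySem.List.pyRange_one_succ_right hi]]
          exact ih (tmp + 1) (pos + piece.length) hle (by push_cast; omega)
    · have hsw : PySem.Chars.startswith m (m.take pos ++ piece) = false := by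
        rw [Bool.eq_false_iff, Ne, hpre]
        exact fun h => hmatch ((pv_take_eq_iff_prefix _ _).mpr h)
      simp [hsw, hmatch]

lemma pv_outer_eq (m : List Char) (pieces : List (List Char)) :
    ∀ (toks : List (List Char)) (i : Nat), pieces.drop i = toks.map pvStrip →
      pvAOuter m i toks = pvBLook m (pvFin m 0 pieces) i toks := by
  intro toks
  induction toks with
  | nil => intro i _; simp [pvAOuter, pvBLook]
  | cons t rest ih =>
    intro i hdrop
    have hdrop' : pieces.drop (i + 1) = rest.map pvStrip := by
      rw [← List.tail_drop, hdrop]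
      simp
    have hik : i < pieces.length := by
      by_contra h
      rw [List.drop_eq_nil_of_le (by omega)] at hdrop
      simp at hdrop
    simp only [pvAOuter, pvBLook]
    by_cases hsw : PySem.Chars.startswith m t = true
    · have hpre : t <+: m := (PySem.Chars.startswith_iff _ _).mp hsw
      have hlen : t.length ≤ m.length := hpre.length_le
      have htake : m.take t.length = t := (pv_take_eq_iff_prefix _ _).mpr hpre
      have heqiff : t = m ↔ t.length = m.length :=
        ⟨fun h => by rw [h], fun h => hpre.eq_of_length h⟩
      have htop : (if t = m then [(i : Int)] else [])
          = (if t.length = m.length then [(i : Int)] else []) := by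
        by_cases hfull : t = m
        · rw [if_pos hfull, if_pos (heqiff.mp hfull)]
        · rw [if_neg hfull, if_neg (fun h => hfull (heqiff.mpr h))]
      have hlook : ((pvFin m 0 pieces).getD (i + 1) []).getD t.length (-1)
          = pvChain m t.length (i + 1) (rest.map pvStrip) := by
        rw [pv_fin_lookup m pieces (i + 1) t.length (by omega) hlen, hdrop']
      rw [if_pos hsw, if_pos hsw, htop, hlook]
      cases rest with
      | nil =>
        simp [pvBLook, pvChain]
      | cons r rs =>
        have hwhile := pv_while_chain m i (r :: rs) i t.length hlen (by omega)
        rw [htake, PySem.List.pyRange_one_singleton] at hwhile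
        rw [if_neg (show ¬((r :: rs).isEmpty = true) from by simp), hwhile,
            ih (i + 1) hdrop']
        simp only [List.map_cons]
        by_cases he : pvChain m t.length (i + 1) (pvStrip r :: rs.map pvStrip) = -1
        · simp [he]
        · simp [he, List.append_assoc]
    · rw [if_neg hsw, if_neg hsw, ih (i + 1) hdrop']
      simp

-- ===== VERDICT (by name: the statement is the Claim_ definition above) =====
theorem find_token_spec : Claim_equal_find_token := by
  intro mat tok_sen _
  unfold Spec_find_token find_token find_token_alt
  exact pv_outer_eq mat.toList ((tok_sen.map String.toList).map pvStrip)
    (tok_sen.map String.toList) 0 (by simp)
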